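-- pv_equiv track=rewrite | github.com/captainhammy/houdini_package_runner | src/houdini_package_runner/utils.py | remove_duplicate_flags
-- ===== SOURCE A (Python) =====
-- from typing import List, Optional
--
-- def remove_duplicate_flags(
--     flags: List[str], to_ignore: Optional[List[str]] = None
-- ) -> List[str]:
--     """Remove any duplicate flag items even if the values differ.
--
--     >>> remove_duplicate_flags(["foo", "--bar=123", "--baz=456", "--bar=789"])
--     ['foo', '--bar=123', '--baz=456']
--     >>> remove_duplicate_flags(["foo", "--bar=123", "--baz=456", "--bar=789"], to_ignore=["--bar"])
--     ['foo', '--bar=123', '--baz=456', '--bar=789']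
--
--     :param flags: A list of flags to check.
--     :param to_ignore: An optional list of flag names to ignore duplicate of.
--     :return: The filtered list of flags.
--
--     """
--     if to_ignore is None:
--         to_ignore = []
--
--     new_flags = []
--
--     seen = []
--
--     for flag in flags:
--         if "=" in flag:
--             name = flag.split("=")[0]
--
--             # If we've seen this flag already, and we're not ignoring
--             # duplicates of it specifically then skip it.
--             if name in seen and name not in to_ignore:
--                 continue
--
--             seen.append(name)
--
--         new_flags.append(flag)
--
--     return new_flags
-- ===== SOURCE B (Python) =====
-- def remove_duplicate_flags(flags, to_ignore=None):
--     """Remove any duplicate flag items even if the values differ."""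
--     ignore = to_ignore if to_ignore is not None else []
--
--     # First pass: first-occurrence index of each '='-flag name.
--     first_index = {}
--     for i, flag in enumerate(flags):
--         if "=" in flag:
--             first_index.setdefault(flag.split("=")[0], i)
--
--     # Second pass: keep non-'=' flags, ignored names, and first occurrences.
--     return [
--         flag
--         for i, flag in enumerate(flags)
--         if "=" not in flag
--         or flag.split("=")[0] in ignore
--         or first_index[flag.split("=")[0]] == i
--     ]
-- ===== Notes on version B (the rewrite author's own statement) =====
-- stated objective: alternative
-- what changed: Replaces the single pass with a growing 'seen' list (linear membership scans) by two passes: one building a first-occurrence index table with dict.setdefault, then a filtering comprehension that keeps a flag iff it has no '=', its name is ignored, or its index equals the recorded first occurrence.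
import Mathlib
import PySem

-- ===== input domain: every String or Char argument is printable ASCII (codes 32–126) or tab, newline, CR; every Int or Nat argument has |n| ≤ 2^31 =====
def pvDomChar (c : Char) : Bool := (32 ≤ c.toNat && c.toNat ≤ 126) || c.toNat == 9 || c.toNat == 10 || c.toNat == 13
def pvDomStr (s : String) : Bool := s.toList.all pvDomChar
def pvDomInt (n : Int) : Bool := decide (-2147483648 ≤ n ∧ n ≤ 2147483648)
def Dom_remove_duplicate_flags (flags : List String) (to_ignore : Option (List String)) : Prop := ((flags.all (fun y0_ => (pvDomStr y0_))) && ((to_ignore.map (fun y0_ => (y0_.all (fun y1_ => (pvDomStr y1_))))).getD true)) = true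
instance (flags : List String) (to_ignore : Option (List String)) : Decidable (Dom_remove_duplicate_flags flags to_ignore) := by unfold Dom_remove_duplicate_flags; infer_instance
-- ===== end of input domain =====

-- B replaces A's single pass with a growing `seen` list by a precomputed first-occurrence
-- index table plus a filtering pass (alternative decomposition; same return value).


-- ===== PORT A =====
-- single pass, state (new_flags, seen); `flag.split("=")[0]` is total (split never returns
-- an empty list), ported as .getD [] |>.headD ""
def remove_duplicate_flags (flags : List String) (to_ignore : Option (List String)) : List String :=
  let ti := to_ignore.getD []
  (flags.foldl
    (fun (st : List String × List String) flag =>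
      if PySem.Str.isIn "=" flag then
        if ((PySem.Str.split? flag "=").getD []).headD "" ∈ st.2
            ∧ ((PySem.Str.split? flag "=").getD []).headD "" ∉ ti then st
        else (st.1 ++ [flag], st.2 ++ [((PySem.Str.split? flag "=").getD []).headD ""])
      else (st.1 ++ [flag], st.2))
    ([], [])).1

-- ===== PORT B =====
-- two passes: build first_index with setdefault over enumerate, then filter by it;
-- `first_index[name]` is always present when "=" in flag, ported as get? … == some i
def remove_duplicate_flags_alt (flags : List String) (to_ignore : Option (List String)) : List String :=
  let ignore := to_ignore.getD []
  let first_index := (PySem.List.enumerate flags 0).foldl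
    (fun (d : PySem.Dict String Int) p =>
      if PySem.Str.isIn "=" p.2 then
        d.setdefault (((PySem.Str.split? p.2 "=").getD []).headD "") p.1
      else d)
    PySem.Dict.empty
  ((PySem.List.enumerate flags 0).filter
    (fun p =>
      !(PySem.Str.isIn "=" p.2)
      || ignore.contains (((PySem.Str.split? p.2 "=").getD []).headD "")
      || (first_index.get? (((PySem.Str.split? p.2 "=").getD []).headD "") == some p.1))).map (·.2)

-- ===== PRECONDITION & SPEC =====
def Spec_remove_duplicate_flags (flags : List String) (to_ignore : Option (List String)) (out : List String) : Prop := out = remove_duplicate_flags_alt flags to_ignore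
instance (flags : List String) (to_ignore : Option (List String)) (out : List String) : Decidable (Spec_remove_duplicate_flags flags to_ignore out) := by unfold Spec_remove_duplicate_flags; infer_instance

-- ===== CLAIM (what is proved, stated in full; the proofs are below) =====
def Claim_equal_remove_duplicate_flags : Prop := ∀ (flags : List String) (to_ignore : Option (List String)), Dom_remove_duplicate_flags flags to_ignore → Spec_remove_duplicate_flags flags to_ignore (remove_duplicate_flags flags to_ignore)

-- ===== LEMMAS AND PROOFS =====

def pvHasEq (f : String) : Bool := PySem.Str.isIn "=" f
def pvNm (f : String) : String := ((PySem.Str.split? f "=").getD []).headD ""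

theorem pvHasEq_def (f : String) : PySem.Str.isIn "=" f = pvHasEq f := rfl
theorem pvNm_def (f : String) : ((PySem.Str.split? f "=").getD []).headD "" = pvNm f := rfl
theorem pvNm_def' (f : String) : ((PySem.Str.split? f "=").getD []).head?.getD "" = pvNm f := by
  unfold pvNm
  generalize (PySem.Str.split? f "=").getD [] = l
  cases l <;> rfl

-- A's loop as structural recursion on the remaining flags
def pvGoA (ti : List String) : List String → List String → List String
  | _, [] => []
  | seen, f :: rest =>
    if pvHasEq f then
      if pvNm f ∈ seen ∧ pvNm f ∉ ti then pvGoA ti seen rest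
      else f :: pvGoA ti (seen ++ [pvNm f]) rest
    else f :: pvGoA ti seen rest

-- functional first-occurrence index, offset k
def pvFirstIdx : List String → String → Int → Option Int
  | [], _, _ => none
  | f :: rest, n, k => if pvHasEq f = true ∧ pvNm f = n then some k else pvFirstIdx rest n (k + 1)

theorem pvFoldA_eq (ti : List String) :
    ∀ (suf acc seen : List String),
      (suf.foldl
        (fun (st : List String × List String) flag =>
          if PySem.Str.isIn "=" flag then
            if ((PySem.Str.split? flag "=").getD []).headD "" ∈ st.2
                ∧ ((PySem.Str.split? flag "=").getD []).headD "" ∉ ti then st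
            else (st.1 ++ [flag], st.2 ++ [((PySem.Str.split? flag "=").getD []).headD ""])
          else (st.1 ++ [flag], st.2))
        (acc, seen)).1 = acc ++ pvGoA ti seen suf := by
  intro suf
  induction suf with
  | nil => intro acc seen; simp [pvGoA]
  | cons f rest ih =>
    intro acc seen
    simp only [List.foldl_cons]
    split_ifs with h h2
    · rw [ih]
      rw [pvHasEq_def] at h
      simp only [pvNm_def] at h2
      simp [pvGoA, h, h2]
    · rw [ih]
      rw [pvHasEq_def] at h
      simp only [pvNm_def] at h2
      simp [pvGoA, pvNm_def', h, h2, List.append_assoc]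
    · rw [ih]
      rw [pvHasEq_def] at h
      simp [pvGoA, h, List.append_assoc]

theorem pvFi_fold (n : String) :
    ∀ (l : List String) (d : PySem.Dict String Int) (k : Int),
      ((PySem.List.enumerate l k).foldl
        (fun (d : PySem.Dict String Int) p =>
          if PySem.Str.isIn "=" p.2 then
            d.setdefault (((PySem.Str.split? p.2 "=").getD []).headD "") p.1
          else d)
        d).get? n = (d.get? n).or (pvFirstIdx l n k) := by
  intro l
  induction l with
  | nil => intro d k; simp [PySem.List.enumerate_nil, pvFirstIdx]
  | cons f rest ih =>
    intro d k
    rw [PySem.List.enumerate_cons]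
    simp only [List.foldl_cons]
    split_ifs with h
    · rw [ih]
      rw [pvHasEq_def] at h
      simp only [pvNm_def]
      by_cases h2 : pvNm f = n
      · have hget : (d.setdefault (pvNm f) k).get? n = some ((d.get? n).getD k) := by
          rw [← h2]
          exact PySem.Dict.get?_setdefault_self d (pvNm f) k
        rw [hget]
        simp only [pvFirstIdx, if_pos (And.intro h h2)]
        cases d.get? n <;> simp
      · have hget : (d.setdefault (pvNm f) k).get? n = d.get? n := by
          exact PySem.Dict.get?_setdefault_of_ne d k (Ne.symm h2)
        rw [hget]
        have hcf : ¬(pvHasEq f = true ∧ pvNm f = n) := by tauto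
        simp only [pvFirstIdx, if_neg hcf]
    · rw [ih]
      rw [pvHasEq_def] at h
      have hcf : ¬(pvHasEq f = true ∧ pvNm f = n) := by tauto
      simp only [pvFirstIdx, if_neg hcf]

theorem pvFirstIdx_append (a : List String) :
    ∀ (b : List String) (n : String) (k : Int),
      pvFirstIdx (a ++ b) n k = (pvFirstIdx a n k).or (pvFirstIdx b n (k + a.length)) := by
  induction a with
  | nil => intro b n k; simp [pvFirstIdx]
  | cons f rest ih =>
    intro b n k
    by_cases h : pvHasEq f = true ∧ pvNm f = n
    · simp [pvFirstIdx, h]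
    · simp only [List.cons_append, pvFirstIdx, if_neg h, ih]
      have harith : (k + 1) + (rest.length : Int) = k + ((rest.length : Int) + 1) := by ring
      simp [harith]

theorem pvFirstIdx_some_lt :
    ∀ (l : List String) (n : String) (k j : Int),
      pvFirstIdx l n k = some j → k ≤ j ∧ j < k + l.length := by
  intro l
  induction l with
  | nil => intro n k j h; simp [pvFirstIdx] at h
  | cons f rest ih =>
    intro n k j h
    by_cases hc : pvHasEq f = true ∧ pvNm f = n
    · simp [pvFirstIdx, hc] at h
      subst h
      simp only [List.length_cons]
      push_cast
      omega
    · simp only [pvFirstIdx, if_neg hc] at h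
      have := ih n (k + 1) j h
      simp only [List.length_cons]
      push_cast
      omega

theorem pvFirstIdx_isSome_iff :
    ∀ (l : List String) (n : String) (k : Int),
      (pvFirstIdx l n k).isSome = true ↔ ∃ f ∈ l, pvHasEq f = true ∧ pvNm f = n := by
  intro l
  induction l with
  | nil => intro n k; simp [pvFirstIdx]
  | cons f rest ih =>
    intro n k
    by_cases hc : pvHasEq f = true ∧ pvNm f = n
    · simp [pvFirstIdx, hc]
    · simp [pvFirstIdx, hc, ih]

theorem pvMain (ti full : List String) (D : PySem.Dict String Int)
    (hD : ∀ n, D.get? n = pvFirstIdx full n 0) :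
    ∀ (suf pre seen : List String),
      full = pre ++ suf →
      (∀ n, n ∈ seen ↔ ∃ f ∈ pre, pvHasEq f = true ∧ pvNm f = n) →
      pvGoA ti seen suf =
        ((PySem.List.enumerate suf (pre.length : Int)).filter
          (fun p =>
            !(PySem.Str.isIn "=" p.2)
            || ti.contains (((PySem.Str.split? p.2 "=").getD []).headD "")
            || (D.get? (((PySem.Str.split? p.2 "=").getD []).headD "") == some p.1))).map (·.2) := by
  intro suf
  induction suf with
  | nil => intro pre seen _ _; simp [pvGoA, PySem.List.enumerate_nil]
  | cons f rest ih =>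
    intro pre seen hfull hinv
    rw [PySem.List.enumerate_cons]
    simp only [List.filter_cons]
    have hpre' : full = (pre ++ [f]) ++ rest := by simpa [List.append_assoc] using hfull
    have hlen : ((pre ++ [f]).length : Int) = (pre.length : Int) + 1 := by
      simp
    split_ifs with hcond
    all_goals simp only [pvNm_def, pvHasEq_def] at hcond
    -- keep branch
    · by_cases h : pvHasEq f = true
      · have hfi : D.get? (pvNm f) = (pvFirstIdx pre (pvNm f) 0).or (some (pre.length : Int)) := by
          rw [hD, hfull, pvFirstIdx_append]
          simp [pvFirstIdx, h]
        have hinvKeep : ∀ n, n ∈ seen ++ [pvNm f] ↔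
            ∃ g ∈ pre ++ [f], pvHasEq g = true ∧ pvNm g = n := by
          intro n
          simp only [List.mem_append, List.mem_singleton]
          constructor
          · rintro (hn | hn)
            · rcases (hinv n).mp hn with ⟨g, hg, hge⟩
              exact ⟨g, Or.inl hg, hge⟩
            · exact ⟨f, Or.inr rfl, h, hn.symm⟩
          · rintro ⟨g, hg | hg, hge⟩
            · exact Or.inl ((hinv n).mpr ⟨g, hg, hge⟩)
            · subst hg
              exact Or.inr hge.2.symm
        by_cases hseen : pvNm f ∈ seen
        · -- must be kept because ignored: show pvNm f ∈ ti
          obtain ⟨j, hj⟩ : ∃ j, pvFirstIdx pre (pvNm f) 0 = some j := by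
            have := (pvFirstIdx_isSome_iff pre (pvNm f) 0).mpr ((hinv (pvNm f)).mp hseen)
            exact Option.isSome_iff_exists.mp this
          have hjlt : j < (pre.length : Int) := by
            have := pvFirstIdx_some_lt pre (pvNm f) 0 j hj
            omega
          have hne : (D.get? (pvNm f) == some (pre.length : Int)) = false := by
            rw [hfi, hj]
            have hjne : j ≠ (pre.length : Int) := by omega
            simp [hjne]
          have hig : pvNm f ∈ ti := by
            rw [h, hne] at hcond
            simpa using hcond
          have hA : pvGoA ti seen (f :: rest) = f :: pvGoA ti (seen ++ [pvNm f]) rest := by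
            simp [pvGoA, h, hseen, hig]
          rw [hA, List.map_cons]
          congr 1
          have := ih (pre ++ [f]) (seen ++ [pvNm f]) hpre' hinvKeep
          rw [hlen] at this
          exact this
        · -- first occurrence: kept by both
          have hA : pvGoA ti seen (f :: rest) = f :: pvGoA ti (seen ++ [pvNm f]) rest := by
            simp [pvGoA, h, hseen]
          rw [hA, List.map_cons]
          congr 1
          have := ih (pre ++ [f]) (seen ++ [pvNm f]) hpre' hinvKeep
          rw [hlen] at this
          exact this
      · -- no "=": kept by both, seen unchanged
        have hA : pvGoA ti seen (f :: rest) = f :: pvGoA ti seen rest := by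
          simp [pvGoA, h]
        rw [hA, List.map_cons]
        congr 1
        have hinvSame : ∀ n, n ∈ seen ↔
            ∃ g ∈ pre ++ [f], pvHasEq g = true ∧ pvNm g = n := by
          intro n
          simp only [List.mem_append, List.mem_singleton]
          constructor
          · intro hn
            rcases (hinv n).mp hn with ⟨g, hg, hge⟩
            exact ⟨g, Or.inl hg, hge⟩
          · rintro ⟨g, hg | hg, hge⟩
            · exact (hinv n).mpr ⟨g, hg, hge⟩
            · subst hg
              exact absurd hge.1 (by simpa using h)
        have := ih (pre ++ [f]) seen hpre' hinvSame
        rw [hlen] at this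
        exact this
    -- skip branch: necessarily hasEq, seen, not ignored
    · have h : pvHasEq f = true := by
        by_contra hh
        rw [Bool.not_eq_true] at hh
        simp [hh] at hcond
      have hig : pvNm f ∉ ti := by
        intro hmem
        simp [hmem] at hcond
      have hfi : D.get? (pvNm f) = (pvFirstIdx pre (pvNm f) 0).or (some (pre.length : Int)) := by
        rw [hD, hfull, pvFirstIdx_append]
        simp [pvFirstIdx, h]
      have hseen : pvNm f ∈ seen := by
        by_contra hns
        have hnone : pvFirstIdx pre (pvNm f) 0 = none := by
          by_contra hcon
          have : (pvFirstIdx pre (pvNm f) 0).isSome = true := Option.isSome_iff_ne_none.mpr hcon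
          exact hns ((hinv (pvNm f)).mpr ((pvFirstIdx_isSome_iff pre (pvNm f) 0).mp this))
        have heq : (D.get? (pvNm f) == some (pre.length : Int)) = true := by
          rw [hfi, hnone]; simp
        rw [h, heq] at hcond
        simp at hcond
      have hA : pvGoA ti seen (f :: rest) = pvGoA ti seen rest := by
        simp [pvGoA, h, hseen, hig]
      rw [hA]
      have hinvSkip : ∀ n, n ∈ seen ↔
          ∃ g ∈ pre ++ [f], pvHasEq g = true ∧ pvNm g = n := by
        intro n
        simp only [List.mem_append, List.mem_singleton]
        constructor
        · intro hn
          rcases (hinv n).mp hn with ⟨g, hg, hge⟩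
          exact ⟨g, Or.inl hg, hge⟩
        · rintro ⟨g, hg | hg, hge⟩
          · exact (hinv n).mpr ⟨g, hg, hge⟩
          · subst hg
            rw [← hge.2]
            exact hseen
      have := ih (pre ++ [f]) seen hpre' hinvSkip
      rw [hlen] at this
      exact this

-- ===== VERDICT (by name: the statement is the Claim_ definition above) =====
theorem remove_duplicate_flags_spec : Claim_equal_remove_duplicate_flags := by
  intro flags to_ignore _
  unfold Spec_remove_duplicate_flags
  simp only [remove_duplicate_flags, remove_duplicate_flags_alt]
  rw [pvFoldA_eq (to_ignore.getD []) flags [] []]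
  have hD : ∀ n, ((PySem.List.enumerate flags 0).foldl
      (fun (d : PySem.Dict String Int) p =>
        if PySem.Str.isIn "=" p.2 then
          d.setdefault (((PySem.Str.split? p.2 "=").getD []).headD "") p.1
        else d)
      PySem.Dict.empty).get? n = pvFirstIdx flags n 0 := by
    intro n
    rw [pvFi_fold]
    simp [PySem.Dict.get?_empty]
  have hmain := pvMain (to_ignore.getD []) flags _ hD flags [] [] (by simp) (by simp)
  simpa using hmain
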